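-- pv_equiv track=rewrite | github.com/archzi/Tetris | game.py | remove_top_blank
-- ===== SOURCE A (Python) =====
-- import random,copy
--
-- def remove_top_blank(block):
--     '''
--     :param block: 清除方块矩阵顶部空行数据  block[blocks_num][0]
--     :return:整理后的方块数据
--     '''
--     result = copy.deepcopy(block)
--     blank_num = 0
--     while sum(result[0])<1 and blank_num<4:
--         del result [0]
--         result.append([0,0,0,0])
--         blank_num +=1
--     return result
-- ===== SOURCE B (Python) =====
-- def remove_top_blank(block):
--     n = 0
--     for row in block:
--         if n >= 4 or sum(row) >= 1:
--             break
--         n += 1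
--     return [list(row) for row in block[n:]] + [[0, 0, 0, 0] for _ in range(n)]
-- ===== Notes on version B (the rewrite author's own statement) =====
-- stated objective: simpler
-- what changed: B counts the leading blank rows (capped at 4) in one pass over the input and builds the result once by slicing and appending fresh zero rows, instead of A's mutate-in-place loop of deepcopy + del-front/append-back.
import Mathlib
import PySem

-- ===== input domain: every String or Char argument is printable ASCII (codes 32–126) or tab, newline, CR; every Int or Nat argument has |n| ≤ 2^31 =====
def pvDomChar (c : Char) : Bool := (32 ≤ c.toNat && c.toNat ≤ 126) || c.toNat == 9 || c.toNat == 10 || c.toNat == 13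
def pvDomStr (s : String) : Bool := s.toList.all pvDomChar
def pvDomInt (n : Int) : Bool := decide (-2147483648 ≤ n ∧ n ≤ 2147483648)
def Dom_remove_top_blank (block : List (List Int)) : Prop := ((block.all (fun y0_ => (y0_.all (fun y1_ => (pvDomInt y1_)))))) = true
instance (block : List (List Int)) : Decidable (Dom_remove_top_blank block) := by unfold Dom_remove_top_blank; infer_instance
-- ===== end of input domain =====

-- B replaces A's deepcopy + repeated del-front/append-back mutation loop with a single
-- leading-blank-row count followed by one slice-and-pad construction (objective: simpler).
-- A mutates only its private deepcopy, so the caller's argument is untouched in both versions.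

-- ===== PORT A =====
-- A's while loop: while sum(result[0]) < 1 and blank_num < 4: del result[0]; result.append([0,0,0,0]); blank_num += 1
-- On result = [] Python's result[0] raises IndexError; that input is excluded by Pre_ (the [] branch is a stand-in).
def pvLoopA (result : List (List Int)) (blank_num : Nat) : List (List Int) :=
  match result with
  | [] => []
  | r :: rest =>
    if _h : r.sum < 1 ∧ blank_num < 4 then
      pvLoopA (rest ++ [[0, 0, 0, 0]]) (blank_num + 1)
    else r :: rest
termination_by 4 - blank_num
decreasing_by omega

def remove_top_blank (block : List (List Int)) : List (List Int) :=
  pvLoopA block 0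

-- ===== PORT B =====
-- B's for-loop: advance n over rows while n < 4 and the row sum is < 1, then stop.
def pvCountB (rows : List (List Int)) (n : Nat) : Nat :=
  match rows with
  | [] => n
  | row :: rest => if 4 ≤ n ∨ 1 ≤ row.sum then n else pvCountB rest (n + 1)

def remove_top_blank_alt (block : List (List Int)) : List (List Int) :=
  let n := pvCountB block 0
  -- [list(row) for row in block[n:]] : the per-row copy is the identity on values
  (block.drop n).map (fun row => row) ++ List.replicate n [0, 0, 0, 0]

-- ===== PRECONDITION & SPEC =====
-- Pre_ excludes exactly the empty block, on which A's result[0] raises IndexError.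
def Pre_remove_top_blank (block : List (List Int)) : Prop := block ≠ []
instance (block : List (List Int)) : Decidable (Pre_remove_top_blank block) := by
  unfold Pre_remove_top_blank; infer_instance

def pvWitness_remove_top_blank : List (List Int) := [[0, 0, 0, 0], [1, 1, 0, 0]]

def Spec_remove_top_blank (block : List (List Int)) (out : List (List Int)) : Prop :=
  out = remove_top_blank_alt block
instance (block : List (List Int)) (out : List (List Int)) : Decidable (Spec_remove_top_blank block out) := by
  unfold Spec_remove_top_blank; infer_instance

-- ===== CLAIM (what is proved, stated in full; the proofs are below) =====
def Claim_equal_remove_top_blank : Prop := ∀ (block : List (List Int)), Dom_remove_top_blank block → Pre_remove_top_blank block → Spec_remove_top_blank block (remove_top_blank block)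
-- ===== LEMMAS AND PROOFS =====

-- number of leading rows with sum < 1, capped by the fuel f
def pvLc (rows : List (List Int)) (f : Nat) : Nat :=
  match rows, f with
  | _, 0 => 0
  | [], _ => 0
  | r :: rest, f + 1 => if r.sum < 1 then pvLc rest f + 1 else 0

lemma pvLc_nil (f : Nat) : pvLc [] f = 0 := by
  cases f <;> rfl

lemma pvRepZ {α : Type} (k : Nat) (z : α) (t : List α) :
    List.replicate k z ++ z :: t = z :: (List.replicate k z ++ t) := by
  induction k with
  | zero => simp
  | succ k ih => simp [List.replicate_succ, ih]

-- key lemma: shifting a zero row from front to back commutes with the drop/pad construction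
lemma pvLc_key (rest : List (List Int)) (f : Nat) :
    (rest ++ [[0, 0, 0, 0]]).drop (pvLc (rest ++ [[0, 0, 0, 0]]) f)
      ++ List.replicate (pvLc (rest ++ [[0, 0, 0, 0]]) f) [0, 0, 0, 0]
    = (rest.drop (pvLc rest f) ++ List.replicate (pvLc rest f) [0, 0, 0, 0]) ++ [[0, 0, 0, 0]] := by
  induction rest generalizing f with
  | nil =>
    cases f with
    | zero => simp [pvLc]
    | succ f => simp [pvLc, pvLc_nil]
  | cons r rs ih =>
    cases f with
    | zero => simp [pvLc]
    | succ f =>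
      by_cases h : r.sum < 1
      · simp only [List.cons_append, pvLc, if_pos h]
        rw [List.replicate_succ, List.replicate_succ]
        simp only [List.drop_succ_cons]
        rw [show ∀ (xs : List (List Int)) (k : Nat),
              xs ++ ([0, 0, 0, 0] : List Int) :: List.replicate k ([0, 0, 0, 0] : List Int)
                = (xs ++ List.replicate k ([0, 0, 0, 0] : List Int)) ++ [[0, 0, 0, 0]] from
              fun xs k => by rw [← List.replicate_succ, List.replicate_succ']; simp]
        rw [ih f]
        simp only [List.append_assoc, List.cons_append, List.nil_append]
        rw [show ([[0,0,0,0],[0,0,0,0]] : List (List Int)) = ([0,0,0,0] : List Int) :: [[0,0,0,0]] from rfl]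
        rw [pvRepZ]
      · simp only [List.cons_append, pvLc, if_neg h]
        simp

lemma pvLoopA_eq (f : Nat) : ∀ (bs : List (List Int)) (bn : Nat), bs ≠ [] → bn + f = 4 →
    pvLoopA bs bn = bs.drop (pvLc bs f) ++ List.replicate (pvLc bs f) [0, 0, 0, 0] := by
  induction f with
  | zero =>
    intro bs bn hne hbn
    match bs with
    | r :: rest =>
      rw [pvLoopA]
      have : ¬ (r.sum < 1 ∧ bn < 4) := by omega
      simp [this, pvLc]
  | succ f ih =>
    intro bs bn hne hbn
    match bs with
    | r :: rest =>
      rw [pvLoopA]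
      by_cases h : r.sum < 1
      · have hcond : r.sum < 1 ∧ bn < 4 := ⟨h, by omega⟩
        rw [dif_pos hcond]
        rw [ih (rest ++ [[0, 0, 0, 0]]) (bn + 1) (by simp) (by omega)]
        rw [pvLc_key]
        simp only [pvLc, if_pos h, List.drop_succ_cons, List.replicate_succ']
        rw [← List.append_assoc]
      · rw [dif_neg (by tauto)]
        simp [pvLc, h]

lemma pvCountB_eq (rows : List (List Int)) : ∀ n, n ≤ 4 → pvCountB rows n = n + pvLc rows (4 - n) := by
  induction rows with
  | nil => intro n _; cases h : 4 - n <;> simp [pvCountB, pvLc]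
  | cons r rest ih =>
    intro n hn
    by_cases h4 : n = 4
    · subst h4
      simp [pvCountB, pvLc]
    · have hf : 4 - n = (4 - (n + 1)) + 1 := by omega
      rw [pvCountB, hf]
      by_cases h : 1 ≤ r.sum
      · simp [h, pvLc, show ¬ r.sum < 1 by omega]
      · have : ¬ (4 ≤ n ∨ 1 ≤ r.sum) := by omega
        rw [if_neg this, ih (n + 1) (by omega)]
        simp only [pvLc, if_pos (show r.sum < 1 by omega)]
        omega

-- ===== VERDICT (by name: the statement is the Claim_ definition above) =====
theorem remove_top_blank_spec : Claim_equal_remove_top_blank := by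
  intro block _hdom hpre
  unfold Spec_remove_top_blank remove_top_blank remove_top_blank_alt
  rw [pvLoopA_eq 4 block 0 hpre rfl, pvCountB_eq block 0 (by omega)]
  simp
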